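-- pv_equiv track=rewrite | github.com/shivrajanand/ML-2026-Entropy-Rag | src/gold_extraction.py | merge_gold_sentences
-- ===== SOURCE A (Python) =====
-- def merge_gold_sentences(gold_list):
--     merged = {}
--     for g in gold_list:
--         merged.setdefault(g["title"], []).append(g["text"])
--
--     docs = []
--     for title, sents in merged.items():
--         docs.append({
--             "title": title,
--             "text": " ".join(sents)
--         })
--     return docs
-- ===== SOURCE B (Python) =====
-- def merge_gold_sentences(gold_list):
--     docs = []
--     index = {}
--     for g in gold_list:
--         t = g["title"]
--         if t in index:
--             docs[index[t]]["text"] += " " + g["text"]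
--         else:
--             index[t] = len(docs)
--             docs.append({"title": t, "text": g["text"]})
--     return docs
-- ===== Notes on version B (the rewrite author's own statement) =====
-- stated objective: alternative
-- what changed: B merges in a single pass that maintains the output list plus a title-to-position index and appends " "+text to the existing document in place, instead of A's two phases (group texts per title into lists, then a second loop re-joining each group).
import Mathlib
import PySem

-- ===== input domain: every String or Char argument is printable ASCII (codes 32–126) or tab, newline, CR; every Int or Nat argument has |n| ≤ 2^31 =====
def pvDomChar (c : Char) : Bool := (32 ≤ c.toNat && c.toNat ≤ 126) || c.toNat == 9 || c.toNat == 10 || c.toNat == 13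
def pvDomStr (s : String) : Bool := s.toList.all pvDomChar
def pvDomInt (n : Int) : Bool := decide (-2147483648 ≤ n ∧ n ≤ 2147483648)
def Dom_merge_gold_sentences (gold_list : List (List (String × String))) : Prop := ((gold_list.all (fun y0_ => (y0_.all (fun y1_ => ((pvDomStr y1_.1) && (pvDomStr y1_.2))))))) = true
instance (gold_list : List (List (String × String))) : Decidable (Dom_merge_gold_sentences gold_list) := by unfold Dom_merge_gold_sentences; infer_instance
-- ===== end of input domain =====

-- B builds the merged documents in ONE pass (docs list + title→position dict, appending " "+text
-- to the existing entry) instead of A's two passes (group texts per title, then re-join).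


-- ===== PORT A =====
-- g["k"]: first-match lookup in the association list; the `.getD ""` arm is unreachable under
-- Pre_ (Python raises KeyError exactly where List.lookup is none).
def pvGetKey (g : List (String × String)) (k : String) : String :=
  (List.lookup k g).getD ""

-- merged.setdefault(g["title"], []).append(g["text"])
def pvStepA (d : PySem.Dict String (List String)) (g : List (String × String)) :
    PySem.Dict String (List String) :=
  d.modify (pvGetKey g "title") [] (· ++ [pvGetKey g "text"])

def merge_gold_sentences (gold_list : List (List (String × String))) : List (List (String × String)) :=
  let merged := gold_list.foldl pvStepA PySem.Dict.empty
  merged.items.foldl (fun docs ts => docs ++ [[("title", ts.1), ("text", PySem.Str.join " " ts.2)]]) []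

-- ===== PORT B =====
-- docs[i]["text"] += " " + x : in-place overwrite of the "text" key of the dict entry
def pvBump (e : List (String × String)) (x : String) : List (String × String) :=
  e.map (fun p => if p.1 == "text" then (p.1, p.2 ++ " " ++ x) else p)

def pvStepB (st : List (List (String × String)) × PySem.Dict String Int)
    (g : List (String × String)) :
    List (List (String × String)) × PySem.Dict String Int :=
  let t := pvGetKey g "title"
  match st.2.get? t with
  | some i => (st.1.set i.toNat (pvBump ((PySem.List.pyGet? st.1 i).getD []) (pvGetKey g "text")), st.2)
  | none => (st.1 ++ [[("title", t), ("text", pvGetKey g "text")]], st.2.insert t (st.1.length : Int))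

def merge_gold_sentences_alt (gold_list : List (List (String × String))) : List (List (String × String)) :=
  (gold_list.foldl pvStepB ([], PySem.Dict.empty)).1

-- ===== PRECONDITION & SPEC =====
-- Pre_ excludes exactly the inputs where the Python A raises KeyError: a sentence dict missing
-- the "title" or "text" key (B raises KeyError there too).
def Pre_merge_gold_sentences (gold_list : List (List (String × String))) : Prop :=
  ∀ g ∈ gold_list, (List.lookup "title" g).isSome = true ∧ (List.lookup "text" g).isSome = true
instance (gold_list : List (List (String × String))) : Decidable (Pre_merge_gold_sentences gold_list) := by
  unfold Pre_merge_gold_sentences; infer_instance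

def pvWitness_merge_gold_sentences : (List (List (String × String))) :=
  [[("title", "a"), ("text", "x")], [("title", "a"), ("text", "y")], [("title", "b"), ("text", "z")]]

def Spec_merge_gold_sentences (gold_list : List (List (String × String))) (out : List (List (String × String))) : Prop := out = merge_gold_sentences_alt gold_list
instance (gold_list : List (List (String × String))) (out : List (List (String × String))) : Decidable (Spec_merge_gold_sentences gold_list out) := by unfold Spec_merge_gold_sentences; infer_instance

-- ===== CLAIM (what is proved, stated in full; the proofs are below) =====
def Claim_equal_merge_gold_sentences : Prop := ∀ (gold_list : List (List (String × String))), Dom_merge_gold_sentences gold_list → Pre_merge_gold_sentences gold_list → Spec_merge_gold_sentences gold_list (merge_gold_sentences gold_list)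

-- ===== LEMMAS AND PROOFS =====

-- the document a title/text-group denotes
def pvEntry (ts : String × List String) : List (String × String) :=
  [("title", ts.1), ("text", PySem.Str.join " " ts.2)]

-- position of the first occurrence of t
def pvPosOf (t : String) : List String → Option Nat
  | [] => none
  | k :: ks => if k = t then some 0 else (pvPosOf t ks).map (· + 1)

lemma pvPosOf_eq_none_iff (t : String) (ks : List String) : pvPosOf t ks = none ↔ t ∉ ks := by
  induction ks with
  | nil => simp [pvPosOf]
  | cons k ks ih =>
    by_cases h : k = t
    · simp [pvPosOf, h]
    · rw [pvPosOf, if_neg h, List.mem_cons, Option.map_eq_none_iff, ih]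
      constructor
      · intro hn hm
        rcases hm with hm | hm
        · exact h hm.symm
        · exact hn hm
      · exact fun hn hm => hn (Or.inr hm)

lemma pvPosOf_spec (t : String) (ks : List String) (j : Nat) (h : pvPosOf t ks = some j) :
    j < ks.length ∧ ks[j]? = some t := by
  induction ks generalizing j with
  | nil => simp [pvPosOf] at h
  | cons k ks ih =>
    by_cases hk : k = t
    · simp [pvPosOf, hk] at h; subst h; simp [hk]
    · simp only [pvPosOf, if_neg hk, Option.map_eq_some_iff] at h
      obtain ⟨j', hj', rfl⟩ := h
      obtain ⟨h1, h2⟩ := ih j' hj'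
      exact ⟨by simpa using Nat.succ_lt_succ h1, by simpa using h2⟩

lemma pvPosOf_append_singleton (t t' : String) (ks : List String) :
    pvPosOf t' (ks ++ [t]) =
      match pvPosOf t' ks with
      | some j => some j
      | none => if t = t' then some ks.length else none := by
  induction ks with
  | nil => simp [pvPosOf]
  | cons k ks ih =>
    by_cases hk : k = t'
    · simp [pvPosOf, hk]
    · simp only [List.cons_append, pvPosOf, if_neg hk, ih]
      cases h : pvPosOf t' ks <;> by_cases ht : t = t' <;> simp [ht]

-- replacing the unique pair with key t equals a set at its position
lemma pvMapReplace_eq_set (l : List (String × List String)) (t : String) (q : String × List String)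
    (j : Nat) (hnd : (l.map (·.1)).Nodup) (hj : pvPosOf t (l.map (·.1)) = some j) :
    l.map (fun p => if (p.1 == t) = true then q else p) = l.set j q := by
  induction l generalizing j with
  | nil => simp [pvPosOf] at hj
  | cons p l ih =>
    simp only [List.map_cons, List.nodup_cons] at hnd
    by_cases hp : p.1 = t
    · simp only [List.map_cons, pvPosOf, if_pos hp] at hj
      cases hj
      have hid : l.map (fun p => if (p.1 == t) = true then q else p) = l := by
        have hc : ∀ r ∈ l, (fun p => if (p.1 == t) = true then q else p) r = id r := by
          intro r hr
          have hr1 : r.1 ≠ t := by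
            intro h
            exact hnd.1 (by rw [hp, ← h]; exact List.mem_map_of_mem hr)
          simp [hr1]
        rw [List.map_congr_left hc, List.map_id]
      rw [List.map_cons, if_pos (by simp [hp]), hid, List.set_cons_zero]
    · simp only [List.map_cons, pvPosOf, if_neg hp, Option.map_eq_some_iff] at hj
      obtain ⟨j', hj', rfl⟩ := hj
      rw [List.map_cons, if_neg (by simp [hp]), List.set_cons_succ, ih _ hnd.2 hj']

lemma pvJoin_singleton (x : String) : PySem.Str.join " " [x] = x := by
  rw [← String.toList_inj, PySem.Str.toList_join]
  simp [PySem.Chars.join_singleton]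

lemma pvCharsJoin_append_singleton (sep x : List Char) :
    ∀ (cs : List Char) (rest : List (List Char)),
      PySem.Chars.join sep (cs :: rest ++ [x]) = PySem.Chars.join sep (cs :: rest) ++ sep ++ x := by
  intro cs rest
  induction rest generalizing cs with
  | nil => simp [PySem.Chars.join_singleton, PySem.Chars.join_cons_cons]
  | cons b rest ih =>
    simp only [List.cons_append] at ih ⊢
    rw [PySem.Chars.join_cons_cons, PySem.Chars.join_cons_cons, ih b]
    simp [List.append_assoc]

lemma pvJoin_append_singleton (ss : List String) (x : String) (h : ss ≠ []) :
    PySem.Str.join " " (ss ++ [x]) = PySem.Str.join " " ss ++ " " ++ x := by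
  rw [← String.toList_inj]
  simp only [PySem.Str.toList_join, String.toList_append, PySem.Str.toList_join]
  obtain ⟨a, tl, rfl⟩ := List.exists_cons_of_ne_nil h
  simpa using pvCharsJoin_append_singleton " ".toList x.toList a.toList (tl.map String.toList)

lemma pvBump_entry (t : String) (ss : List String) (x : String) (h : ss ≠ []) :
    pvBump (pvEntry (t, ss)) x = pvEntry (t, ss ++ [x]) := by
  simp [pvBump, pvEntry, pvJoin_append_singleton ss x h]

-- the main loop invariant: B's (docs, index) mirrors A's grouping dict m
lemma pvLoop_link : ∀ (l : List (List (String × String))) (m : PySem.Dict String (List String))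
    (docs : List (List (String × String))) (index : PySem.Dict String Int),
    m.keys.Nodup →
    docs = m.items.map pvEntry →
    (∀ p ∈ m.items, p.2 ≠ []) →
    (∀ t, index.get? t = (pvPosOf t m.keys).map (fun j => (j : Int))) →
    (l.foldl pvStepB (docs, index)).1 = (l.foldl pvStepA m).items.map pvEntry := by
  intro l
  induction l with
  | nil => intro m docs index _ hdocs _ _; simpa using hdocs
  | cons g l ih =>
    intro m docs index hnd hdocs hne hidx
    simp only [List.foldl_cons]
    set t := pvGetKey g "title" with ht
    set x := pvGetKey g "text" with hx
    have hkeys_items : m.keys = m.items.map (·.1) := by simp [PySem.Dict.keys]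
    have hlen : docs.length = m.keys.length := by
      simp [hdocs, hkeys_items]
    cases hpos : pvPosOf t m.keys with
    | none =>
      have htmem : t ∉ m.keys := (pvPosOf_eq_none_iff t m.keys).mp hpos
      have hcont : m.contains t = false := by
        rw [← Bool.not_eq_true]
        simp [PySem.Dict.contains_iff_mem_keys, htmem]
      have hget : index.get? t = none := by simp [hidx t, hpos]
      have hstepB : pvStepB (docs, index) g =
          (docs ++ [[("title", t), ("text", x)]], index.insert t (docs.length : Int)) := by
        simp [pvStepB, hget, ← ht, ← hx]
      have hstepA : (pvStepA m g).items = m.items ++ [(t, [x])] := by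
        simp only [pvStepA, PySem.Dict.modify, ← ht, ← hx]
        rw [PySem.Dict.getD_of_not_contains m [] hcont,
          PySem.Dict.items_insert_of_not_contains m _ hcont]
        simp
      have hkeysA : (pvStepA m g).keys = m.keys ++ [t] := by
        simp only [pvStepA, PySem.Dict.modify, ← ht, ← hx]
        exact PySem.Dict.keys_insert_of_not_contains m _ hcont
      rw [hstepB]
      apply ih
      · rw [hkeysA]
        refine List.Nodup.append hnd (List.nodup_singleton t) ?_
        intro a ha hb
        rw [List.mem_singleton] at hb
        exact htmem (hb ▸ ha)
      · rw [hstepA]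
        simp [hdocs, pvEntry, pvJoin_singleton]
      · rw [hstepA]
        intro p hp
        rcases List.mem_append.mp hp with h' | h'
        · exact hne p h'
        · simp at h'; simp [h']
      · intro t'
        rw [hkeysA, pvPosOf_append_singleton, PySem.Dict.get?_insert]
        by_cases h' : t' = t
        · subst h'
          simp [hpos, hlen]
        · rw [if_neg h', hidx t']
          cases h'' : pvPosOf t' m.keys with
          | some j => simp
          | none => rw [if_neg (fun hh : t = t' => h' hh.symm)]
    | some j =>
      have hget : index.get? t = some (j : Int) := by simp [hidx t, hpos]
      obtain ⟨hjlt, hkj⟩ := pvPosOf_spec t m.keys j hpos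
      have htmem : t ∈ m.keys := by
        exact List.mem_of_getElem? hkj
      have hcont : m.contains t = true := (PySem.Dict.contains_iff_mem_keys m t).mpr htmem
      have hjlt' : j < m.items.length := by
        rw [hkeys_items] at hjlt; simpa using hjlt
      have hitemj1 : (m.items[j]'hjlt').1 = t := by
        rw [hkeys_items] at hkj
        rw [List.getElem?_map] at hkj
        simp only [List.getElem?_eq_getElem hjlt'] at hkj
        simpa using hkj
      set ss := (m.items[j]'hjlt').2 with hss
      have hpair : (t, ss) ∈ m.items := by
        have : m.items[j]'hjlt' = (t, ss) := by
          rw [Prod.ext_iff]; exact ⟨hitemj1, rfl⟩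
        rw [← this]; exact List.getElem_mem hjlt'
      have hssne : ss ≠ [] := hne (t, ss) hpair
      have hgetD : m.getD t [] = ss := PySem.Dict.getD_of_mem_items m hpair hnd []
      have hdocsj : docs[j]? = some (pvEntry (t, ss)) := by
        rw [hdocs, List.getElem?_map, List.getElem?_eq_getElem hjlt']
        have : m.items[j]'hjlt' = (t, ss) := by rw [Prod.ext_iff]; exact ⟨hitemj1, rfl⟩
        simp [this]
      have hstepB : pvStepB (docs, index) g =
          (docs.set j (pvBump (pvEntry (t, ss)) x), index) := by
        simp [pvStepB, hget, ← ht, ← hx, PySem.List.pyGet?_natCast, hdocsj]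
      have hstepA : (pvStepA m g).items = m.items.set j (t, ss ++ [x]) := by
        simp only [pvStepA, PySem.Dict.modify, ← ht, ← hx]
        rw [hgetD, PySem.Dict.items_insert_of_contains m _ hcont]
        apply pvMapReplace_eq_set
        · rw [← hkeys_items]; exact hnd
        · rw [← hkeys_items]; exact hpos
      have hkeysA : (pvStepA m g).keys = m.keys := by
        simp only [pvStepA, PySem.Dict.modify, ← ht, ← hx]
        exact PySem.Dict.keys_insert_of_contains m _ hcont
      rw [hstepB]
      apply ih
      · rw [hkeysA]; exact hnd
      · rw [hstepA, hdocs, List.map_set, pvBump_entry t ss x hssne]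
      · rw [hstepA]
        intro p hp
        rcases List.mem_or_eq_of_mem_set hp with h' | h'
        · exact hne p h'
        · simp [h']
      · intro t'; rw [hkeysA]; exact hidx t'

-- ===== VERDICT (by name: the statement is the Claim_ definition above) =====
theorem merge_gold_sentences_spec : Claim_equal_merge_gold_sentences := by
  intro gold_list _ _
  unfold Spec_merge_gold_sentences merge_gold_sentences merge_gold_sentences_alt
  rw [PySem.List.foldl_append_singleton_eq_map]
  rw [pvLoop_link gold_list PySem.Dict.empty [] PySem.Dict.empty]
  · simp [pvEntry]
  · simp [PySem.Dict.keys_empty]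
  · rw [show PySem.Dict.empty.items = ([] : List (String × List String)) from rfl]
    simp
  · intro p hp
    rw [show PySem.Dict.empty.items = ([] : List (String × List String)) from rfl] at hp
    exact absurd hp (List.not_mem_nil)
  · intro t; simp [PySem.Dict.get?_empty, PySem.Dict.keys_empty, pvPosOf]
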